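-- pv_equiv track=rewrite | github.com/jkama4/conv_ai_project | src/final_project/evaluation.py | calc_tokens
-- ===== SOURCE A (Python) =====
-- from typing import Dict, Tuple, List
--
-- def calc_tokens(
--     completion: List[Dict]
-- ) -> Tuple[int, int]:
--
--     assistant_texts, user_texts = [], []
--
--     for turn in completion:
--         if turn["role"] == "assistant":
--             assistant_texts.append(turn["content"])
--         else:
--             user_texts.append(turn["content"])
--
--     assistant_texts = " ".join(assistant_texts)
--     user_texts = " ".join(user_texts)
--
--     return len(assistant_texts), len(user_texts)
-- ===== SOURCE B (Python) =====
-- def calc_tokens(completion):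
--     assistant_chars = assistant_count = user_chars = user_count = 0
--     for turn in completion:
--         n = len(turn["content"])
--         if turn["role"] == "assistant":
--             assistant_chars += n
--             assistant_count += 1
--         else:
--             user_chars += n
--             user_count += 1
--     return (assistant_chars + max(assistant_count - 1, 0),
--             user_chars + max(user_count - 1, 0))
-- ===== Notes on version B (the rewrite author's own statement) =====
-- stated objective: simpler
-- what changed: Single pass keeping four integer counters (char sums and turn counts per role) and adding max(count-1,0) join separators in closed form, instead of building two lists and joining them into strings just to take their lengths.
import Mathlib
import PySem

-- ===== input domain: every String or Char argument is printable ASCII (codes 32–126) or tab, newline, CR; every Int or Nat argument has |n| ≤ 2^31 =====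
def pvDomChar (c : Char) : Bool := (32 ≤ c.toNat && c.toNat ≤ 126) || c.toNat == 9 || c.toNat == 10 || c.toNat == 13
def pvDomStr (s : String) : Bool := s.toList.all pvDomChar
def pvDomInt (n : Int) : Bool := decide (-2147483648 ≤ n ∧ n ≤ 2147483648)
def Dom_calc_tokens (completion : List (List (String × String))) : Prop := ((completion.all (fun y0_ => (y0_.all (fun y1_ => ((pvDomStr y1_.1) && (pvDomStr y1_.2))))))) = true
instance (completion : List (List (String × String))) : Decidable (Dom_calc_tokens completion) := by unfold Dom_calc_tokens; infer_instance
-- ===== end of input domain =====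

-- B replaces A's list-building and string joins by a single pass over the turns keeping four
-- integer counters, adding the max(count-1,0) join separators in closed form (objective: simpler).

-- turn[k] for a dict turn; total via default "" — Pre_ guarantees the key is present
def pvAt (turn : List (String × String)) (k : String) : String :=
  (PySem.Dict.mk turn).getD k ""

-- ===== PORT A =====
def calcStepA (acc : List String × List String) (turn : List (String × String)) :
    List String × List String :=
  if pvAt turn "role" == "assistant" then (acc.1 ++ [pvAt turn "content"], acc.2)
  else (acc.1, acc.2 ++ [pvAt turn "content"])

def calc_tokens (completion : List (List (String × String))) : Int × Int :=
  let p := completion.foldl calcStepA ([], [])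
  (PySem.Str.len (PySem.Str.join " " p.1), PySem.Str.len (PySem.Str.join " " p.2))

-- ===== PORT B =====
def calcStepB (acc : Int × Int × Int × Int) (turn : List (String × String)) :
    Int × Int × Int × Int :=
  let n := PySem.Str.len (pvAt turn "content")
  if pvAt turn "role" == "assistant" then (acc.1 + n, acc.2.1 + 1, acc.2.2.1, acc.2.2.2)
  else (acc.1, acc.2.1, acc.2.2.1 + n, acc.2.2.2 + 1)

def calc_tokens_alt (completion : List (List (String × String))) : Int × Int :=
  let q := completion.foldl calcStepB (0, 0, 0, 0)
  (q.1 + max (q.2.1 - 1) 0, q.2.2.1 + max (q.2.2.2 - 1) 0)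

-- ===== PRECONDITION & SPEC =====
-- A raises KeyError unless every turn has both "role" and "content" keys
def Pre_calc_tokens (completion : List (List (String × String))) : Prop :=
  ∀ turn ∈ completion,
    (PySem.Dict.mk turn).contains "role" = true ∧ (PySem.Dict.mk turn).contains "content" = true
instance (completion : List (List (String × String))) : Decidable (Pre_calc_tokens completion) := by
  unfold Pre_calc_tokens; infer_instance

def pvWitness_calc_tokens : (List (List (String × String))) :=
  [[("role", "user"), ("content", "hi")], [("role", "assistant"), ("content", "hello!")]]

def Spec_calc_tokens (completion : List (List (String × String))) (out : Int × Int) : Prop := out = calc_tokens_alt completion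
instance (completion : List (List (String × String))) (out : Int × Int) : Decidable (Spec_calc_tokens completion out) := by unfold Spec_calc_tokens; infer_instance

-- ===== CLAIM (what is proved, stated in full; the proofs are below) =====
def Claim_equal_calc_tokens : Prop := ∀ (completion : List (List (String × String))), Dom_calc_tokens completion → Pre_calc_tokens completion → Spec_calc_tokens completion (calc_tokens completion)

-- ===== LEMMAS AND PROOFS =====

-- char sum and count of a list of strings (B's two accumulators for one role)
def pvS (xs : List String) : Int := (xs.map PySem.Str.len).sum
def pvC (xs : List String) : Int := (xs.length : Int)

theorem pvS_snoc (xs : List String) (x : String) : pvS (xs ++ [x]) = pvS xs + PySem.Str.len x := by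
  simp [pvS]

theorem pvC_snoc (xs : List String) (x : String) : pvC (xs ++ [x]) = pvC xs + 1 := by
  simp [pvC]

-- length of ' '-join on the char level
theorem joinLenC (ps : List (List Char)) :
    ((PySem.Chars.join [' '] ps).length : Int)
      = (ps.map (fun p => (p.length : Int))).sum + max ((ps.length : Int) - 1) 0 := by
  induction ps with
  | nil => simp [PySem.Chars.join_nil]
  | cons p rest ih =>
    cases rest with
    | nil => simp [PySem.Chars.join_singleton]
    | cons q rest' =>
      rw [PySem.Chars.join_cons_cons, List.length_append, List.length_append]
      simp only [List.map_cons, List.sum_cons, List.length_cons, List.length_nil] at ih ⊢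
      push_cast at ih ⊢
      omega

-- length of ' '-join = char sum + (count - 1 clamped at 0) separators
theorem joinLen (xs : List String) :
    PySem.Str.len (PySem.Str.join " " xs) = pvS xs + max (pvC xs - 1) 0 := by
  have h : (" " : String).toList = [' '] := rfl
  rw [PySem.Str.len_eq, PySem.Str.toList_join, h, joinLenC]
  have hf : PySem.Str.len = fun s : String => ((s.toList.length : Nat) : Int) :=
    funext PySem.Str.len_eq
  simp only [List.map_map, List.length_map, Function.comp_def, pvS, pvC, hf]

-- B's fold tracks (char sum, count) of both lists A's fold builds
theorem loopRel (comp : List (List (String × String))) : ∀ a u : List String,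
    comp.foldl calcStepB (pvS a, pvC a, pvS u, pvC u)
      = (pvS (comp.foldl calcStepA (a, u)).1, pvC (comp.foldl calcStepA (a, u)).1,
         pvS (comp.foldl calcStepA (a, u)).2, pvC (comp.foldl calcStepA (a, u)).2) := by
  induction comp with
  | nil => intro a u; simp
  | cons turn rest ih =>
    intro a u
    simp only [List.foldl_cons]
    by_cases h : (pvAt turn "role" == "assistant") = true
    · rw [show calcStepB (pvS a, pvC a, pvS u, pvC u) turn
            = (pvS (a ++ [pvAt turn "content"]), pvC (a ++ [pvAt turn "content"]), pvS u, pvC u) by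
          simp [calcStepB, h, pvS_snoc, pvC_snoc],
        show calcStepA (a, u) turn = (a ++ [pvAt turn "content"], u) by simp [calcStepA, h]]
      exact ih _ _
    · rw [show calcStepB (pvS a, pvC a, pvS u, pvC u) turn
            = (pvS a, pvC a, pvS (u ++ [pvAt turn "content"]), pvC (u ++ [pvAt turn "content"])) by
          simp [calcStepB, h, pvS_snoc, pvC_snoc],
        show calcStepA (a, u) turn = (a, u ++ [pvAt turn "content"]) by simp [calcStepA, h]]
      exact ih _ _

-- ===== VERDICT (by name: the statement is the Claim_ definition above) =====
theorem calc_tokens_spec : Claim_equal_calc_tokens := by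
  intro completion _ _
  unfold Spec_calc_tokens calc_tokens calc_tokens_alt
  have h0 : ((0 : Int), (0 : Int), (0 : Int), (0 : Int))
      = (pvS [], pvC [], pvS [], pvC []) := by simp [pvS, pvC]
  rw [h0, loopRel completion [] []]
  exact Prod.ext (joinLen _) (joinLen _)
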